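-- pv_equiv track=rewrite | github.com/akashghadge/competitive-programming | Company Test/TCS Codevita Round 2 A,N/COC.py | solution_for_the_problem
-- ===== SOURCE A (Python) =====
-- def solution_for_the_problem(itemDamage, totalSize, itemCategory, maxSize):
--     ans = 0
--     n = len(itemDamage)
--
--     for mask in range(1 << n):
--         curr_ans = 0
--         current_size = 0
--
--         selected_categories = set()
--
--         for i in range(n):
--             if mask & (1 << i):
--                 curr_ans += itemDamage[i]
--                 current_size += totalSize[i]
--                 selected_categories.add(itemCategory[i])
--
--         if current_size <= maxSize and len(selected_categories) == bin(mask).count('1'):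
--             ans = max(ans, curr_ans)
--
--     return ans
-- ===== SOURCE B (Python) =====
-- def solution_for_the_problem(itemDamage, totalSize, itemCategory, maxSize):
--     items = list(zip(itemDamage, totalSize, itemCategory))
--
--     def go(items, used, size):
--         # best extra damage achievable from `items` given categories `used`
--         # and accumulated size `size`; None if no completion fits in maxSize
--         if not items:
--             return 0 if size <= maxSize else None
--         d, s, c = items[0]
--         rest = items[1:]
--         res = go(rest, used, size)          # skip this item
--         if c not in used:                   # take it (categories stay distinct)
--             t = go(rest, used | {c}, size + s)
--             if t is not None:
--                 cand = d + t
--                 if res is None or cand > res: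
--                     res = cand
--         return res
--
--     r = go(items, frozenset(), 0)
--     return max(0, r) if r is not None else 0
-- ===== Notes on version B (the rewrite author's own statement) =====
-- stated objective: alternative
-- what changed: A enumerates all 2^n bitmasks and rebuilds each subset's damage, size and category-set from scratch with an inner O(n) scan; B zips the items once and does an include/exclude recursion that threads the running size and used-category set, sharing common prefixes and pruning the include branch when the category is already used.
import Mathlib
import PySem

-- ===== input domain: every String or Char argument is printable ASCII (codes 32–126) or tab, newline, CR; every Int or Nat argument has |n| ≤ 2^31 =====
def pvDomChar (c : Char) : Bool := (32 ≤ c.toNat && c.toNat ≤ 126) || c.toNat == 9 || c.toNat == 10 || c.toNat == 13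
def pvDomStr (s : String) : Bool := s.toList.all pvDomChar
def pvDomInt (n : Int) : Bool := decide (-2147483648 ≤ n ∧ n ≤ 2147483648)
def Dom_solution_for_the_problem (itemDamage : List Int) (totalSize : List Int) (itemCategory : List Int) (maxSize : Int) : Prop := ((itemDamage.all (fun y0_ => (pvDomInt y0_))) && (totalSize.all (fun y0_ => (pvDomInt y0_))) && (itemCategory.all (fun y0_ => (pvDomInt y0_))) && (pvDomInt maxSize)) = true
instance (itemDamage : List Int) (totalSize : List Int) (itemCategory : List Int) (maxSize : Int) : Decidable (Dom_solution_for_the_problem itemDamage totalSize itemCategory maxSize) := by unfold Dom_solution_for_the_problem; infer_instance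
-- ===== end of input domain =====

-- ===== PORT A =====
-- One-line summary: B replaces A's per-mask rescan (every subset rebuilt from scratch) by an
-- include/exclude recursion that shares common prefixes and skips already-used categories.
-- Port notes for A: `for mask in range(1 << n)` runs over the naturals; `mask & (1 << i) != 0`
-- is Nat's `&&&`/`<<<`; `bin(mask).count('1')` is PySem.Int.bitCount (exact: both count the
-- binary 1-digits, also for negatives); `itemDamage[i]`/`totalSize[i]`/`itemCategory[i]` via
-- PySem.List.pyGet? (inside Pre_ every index is in range, so `.getD 0` is never the default).
def solution_for_the_problem (itemDamage : List Int) (totalSize : List Int) (itemCategory : List Int) (maxSize : Int) : Int :=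
  let n := itemDamage.length
  (List.range (2 ^ n)).foldl (fun ans mask =>
    let st := (List.range n).foldl (fun (st : Int × Int × PySem.Set Int) i =>
      if mask &&& (1 <<< i) ≠ 0 then
        (st.1 + (PySem.List.pyGet? itemDamage (i : Int)).getD 0,
         st.2.1 + (PySem.List.pyGet? totalSize (i : Int)).getD 0,
         PySem.Set.add st.2.2 ((PySem.List.pyGet? itemCategory (i : Int)).getD 0))
      else st) (0, 0, PySem.Set.empty)
    if st.2.1 ≤ maxSize ∧ st.2.2.length = PySem.Int.bitCount (mask : Int) then max ans st.1 else ans) 0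

-- ===== PORT B =====
-- go(items, used, size): best extra damage from `items` given used categories and accumulated
-- size; none = no completion fits in maxSize.
def pvGoB (maxSize : Int) : List (Int × Int × Int) → PySem.Set Int → Int → Option Int
  | [], _, size => if size ≤ maxSize then some 0 else none
  | (d, s, c) :: rest, used, size =>
    let res := pvGoB maxSize rest used size
    if PySem.Set.contains used c = false then
      match pvGoB maxSize rest (PySem.Set.add used c) (size + s) with
      | none => res
      | some t =>
        let cand := d + t
        match res with
        | none => some cand
        | some r => if cand > r then some cand else some r
    else res

def solution_for_the_problem_alt (itemDamage : List Int) (totalSize : List Int) (itemCategory : List Int) (maxSize : Int) : Int :=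
  let items := itemDamage.zip (totalSize.zip itemCategory)
  match pvGoB maxSize items PySem.Set.empty 0 with
  | none => 0
  | some r => max 0 r

-- ===== PRECONDITION & SPEC =====
-- Pre_ excludes exactly the inputs on which A raises IndexError: totalSize or itemCategory
-- shorter than itemDamage (A indexes both at every i < len(itemDamage) of a selected mask).
def Pre_solution_for_the_problem (itemDamage : List Int) (totalSize : List Int) (itemCategory : List Int) (maxSize : Int) : Prop :=
  itemDamage.length ≤ totalSize.length ∧ itemDamage.length ≤ itemCategory.length
instance (itemDamage : List Int) (totalSize : List Int) (itemCategory : List Int) (maxSize : Int) : Decidable (Pre_solution_for_the_problem itemDamage totalSize itemCategory maxSize) := by unfold Pre_solution_for_the_problem; infer_instance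
def pvWitness_solution_for_the_problem : List Int × List Int × List Int × Int := ([3, 4], [1, 1], [7, 7], 1)
def Spec_solution_for_the_problem (itemDamage : List Int) (totalSize : List Int) (itemCategory : List Int) (maxSize : Int) (out : Int) : Prop := out = solution_for_the_problem_alt itemDamage totalSize itemCategory maxSize
instance (itemDamage : List Int) (totalSize : List Int) (itemCategory : List Int) (maxSize : Int) (out : Int) : Decidable (Spec_solution_for_the_problem itemDamage totalSize itemCategory maxSize out) := by unfold Spec_solution_for_the_problem; infer_instance

-- ===== CLAIM (what is proved, stated in full; the proofs are below) =====
def Claim_equal_solution_for_the_problem : Prop := ∀ (itemDamage : List Int) (totalSize : List Int) (itemCategory : List Int) (maxSize : Int), Dom_solution_for_the_problem itemDamage totalSize itemCategory maxSize → Pre_solution_for_the_problem itemDamage totalSize itemCategory maxSize → Spec_solution_for_the_problem itemDamage totalSize itemCategory maxSize (solution_for_the_problem itemDamage totalSize itemCategory maxSize)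

-- ===== LEMMAS AND PROOFS =====

-- The subset of items selected by the bits of m (bit 0 = head).
def pvSel : Nat → List (Int × Int × Int) → List (Int × Int × Int)
  | _, [] => []
  | m, x :: xs => if m % 2 = 1 then x :: pvSel (m / 2) xs else pvSel (m / 2) xs

def pvDsum (l : List (Int × Int × Int)) : Int := (l.map (fun x => x.1)).sum
def pvSsum (l : List (Int × Int × Int)) : Int := (l.map (fun x => x.2.1)).sum
def pvCats (l : List (Int × Int × Int)) : List Int := l.map (fun x => x.2.2)

-- v is the damage of a subset of `items` with pairwise-distinct categories avoiding `used`
-- whose size, added to `size`, fits in maxSize.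
def pvAch (maxSize : Int) (items : List (Int × Int × Int)) (used : List Int) (size : Int) (v : Int) : Prop :=
  ∃ T, T.Sublist items ∧ (pvCats T).Nodup ∧ (∀ x ∈ pvCats T, x ∉ used) ∧ size + pvSsum T ≤ maxSize ∧ v = pvDsum T

def pvOMax (S : Int → Prop) : Option Int → Prop
  | none => ∀ v, ¬ S v
  | some m => S m ∧ ∀ v, S v → v ≤ m

lemma pvOMax_congr {S S' : Int → Prop} (h : ∀ v, S v ↔ S' v) {o : Option Int} (ho : pvOMax S o) : pvOMax S' o := by
  cases o with
  | none => intro v hv; exact ho v ((h v).mpr hv)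
  | some m => exact ⟨(h m).mp ho.1, fun v hv => ho.2 v ((h v).mpr hv)⟩

lemma pvAch_cons (M d s c : Int) (rest : List (Int × Int × Int)) (used : List Int) (size v : Int) :
    pvAch M ((d, s, c) :: rest) used size v ↔
      pvAch M rest used size v ∨
        (c ∉ used ∧ ∃ t, pvAch M rest (PySem.Set.add used c) (size + s) t ∧ v = d + t) := by
  constructor
  · rintro ⟨T, hT, hnd, hmem, hsz, rfl⟩
    rcases List.sublist_cons_iff.mp hT with h | ⟨r, rfl, hr⟩
    · exact Or.inl ⟨T, h, hnd, hmem, hsz, rfl⟩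
    · simp only [pvCats, List.map_cons, List.nodup_cons, List.forall_mem_cons] at hnd hmem
      refine Or.inr ⟨hmem.1, pvDsum r, ⟨r, hr, hnd.2, ?_, ?_, rfl⟩, ?_⟩
      · intro x hx
        rw [PySem.Set.mem_add]
        rintro (h1 | rfl)
        · exact hmem.2 x hx h1
        · exact hnd.1 (by simpa [pvCats] using hx)
      · simp only [pvSsum, List.map_cons, List.sum_cons] at hsz
        simp only [pvSsum]; omega
      · simp [pvDsum]
  · rintro (⟨T, hT, hnd, hmem, hsz, rfl⟩ | ⟨hcu, t, ⟨T, hT, hnd, hmem, hsz, rfl⟩, rfl⟩)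
    · exact ⟨T, hT.cons _, hnd, hmem, hsz, rfl⟩
    · refine ⟨(d, s, c) :: T, hT.cons_cons _, ?_, ?_, ?_, ?_⟩
      · simp only [pvCats, List.map_cons, List.nodup_cons]
        exact ⟨fun hc2 => hmem c (by simpa [pvCats] using hc2)
          ((PySem.Set.mem_add used c c).mpr (Or.inr rfl)), hnd⟩
      · simp only [pvCats, List.map_cons, List.forall_mem_cons]
        refine ⟨hcu, fun x hx hxu => hmem x hx ((PySem.Set.mem_add used c x).mpr (Or.inl hxu))⟩
      · simp only [pvSsum, List.map_cons, List.sum_cons]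
        simp only [pvSsum] at hsz; omega
      · simp [pvDsum]

lemma pvGoB_omax (M : Int) : ∀ (items : List (Int × Int × Int)) (used : PySem.Set Int) (size : Int),
    pvOMax (pvAch M items used size) (pvGoB M items used size) := by
  intro items
  induction items with
  | nil =>
    intro used size
    simp only [pvGoB]
    split_ifs with h
    · refine ⟨⟨[], List.Sublist.refl [], by simp [pvCats], by simp [pvCats],
        by simpa [pvSsum] using h, by simp [pvDsum]⟩, ?_⟩
      rintro v ⟨T, hT, -, -, -, rfl⟩
      rcases List.sublist_nil.mp hT with rfl
      simp [pvDsum]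
    · rintro v ⟨T, hT, -, -, hsz, rfl⟩
      rcases List.sublist_nil.mp hT with rfl
      exact h (by simpa [pvSsum] using hsz)
  | cons x rest ih =>
    obtain ⟨d, s, c⟩ := x
    intro used size
    have ih1 := ih used size
    have ih2 := ih (PySem.Set.add used c) (size + s)
    have hach := fun v => pvAch_cons M d s c rest used size v
    by_cases hc : PySem.Set.contains used c = false
    · have hcu : c ∉ used := by simpa using hc
      cases h2 : pvGoB M rest (PySem.Set.add used c) (size + s) with
      | none =>
        rw [h2] at ih2
        have : pvGoB M ((d, s, c) :: rest) used size = pvGoB M rest used size := by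
          simp only [pvGoB]
          rw [hc, if_pos rfl, h2]
        rw [this]
        refine pvOMax_congr (fun v => ?_) ih1
        rw [hach v]
        constructor
        · exact Or.inl
        · rintro (h | ⟨-, t, ht, rfl⟩)
          · exact h
          · exact absurd ht (ih2 t)
      | some t =>
        rw [h2] at ih2
        cases h1 : pvGoB M rest used size with
        | none =>
          rw [h1] at ih1
          have : pvGoB M ((d, s, c) :: rest) used size = some (d + t) := by
            simp only [pvGoB]
            rw [hc, if_pos rfl, h2, h1]
          rw [this]
          refine ⟨(hach _).mpr (Or.inr ⟨hcu, t, ih2.1, rfl⟩), ?_⟩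
          intro v hv
          rcases (hach v).mp hv with h | ⟨-, t', ht', rfl⟩
          · exact absurd h (ih1 v)
          · have := ih2.2 t' ht'; omega
        | some r =>
          rw [h1] at ih1
          by_cases hgt : d + t > r
          · have : pvGoB M ((d, s, c) :: rest) used size = some (d + t) := by
              simp only [pvGoB]
              rw [hc, if_pos rfl, h2, h1]
              simp [hgt]
            rw [this]
            refine ⟨(hach _).mpr (Or.inr ⟨hcu, t, ih2.1, rfl⟩), ?_⟩
            intro v hv
            rcases (hach v).mp hv with h | ⟨-, t', ht', rfl⟩
            · exact le_trans (ih1.2 v h) (le_of_lt hgt)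
            · have := ih2.2 t' ht'; omega
          · have : pvGoB M ((d, s, c) :: rest) used size = some r := by
              simp only [pvGoB]
              rw [hc, if_pos rfl, h2, h1]
              simp [hgt]
            rw [this]
            refine ⟨(hach _).mpr (Or.inl ih1.1), ?_⟩
            intro v hv
            rcases (hach v).mp hv with h | ⟨-, t', ht', rfl⟩
            · exact ih1.2 v h
            · have := ih2.2 t' ht'; omega
    · have hcu : c ∈ used := by simpa using hc
      have : pvGoB M ((d, s, c) :: rest) used size = pvGoB M rest used size := by
        simp only [pvGoB]
        rw [Bool.not_eq_false] at hc
        rw [hc]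
        simp
      rw [this]
      refine pvOMax_congr (fun v => ?_) ih1
      rw [hach v]
      constructor
      · exact Or.inl
      · rintro (h | ⟨hcu', -⟩)
        · exact h
        · exact absurd hcu hcu'

-- ----- A side -----

lemma pvBit_iff (m i : Nat) : (m &&& (1 <<< i) ≠ 0) ↔ m.testBit i := by
  rw [Nat.shiftLeft_eq, one_mul, Nat.and_two_pow]
  cases h : m.testBit i <;> simp

lemma pvSel_zero : ∀ (items : List (Int × Int × Int)), pvSel 0 items = [] := by
  intro items; induction items with
  | nil => rfl
  | cons x xs ih => simp [pvSel, ih]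

lemma pvSel_sublist : ∀ (m : Nat) (items : List (Int × Int × Int)), (pvSel m items).Sublist items := by
  intro m items; induction items generalizing m with
  | nil => simp [pvSel]
  | cons x xs ih =>
    by_cases h : m % 2 = 1 <;> simp [pvSel, h]
    · exact ih (m / 2)
    · exact (ih (m / 2)).cons x

lemma pvSel_length : ∀ (items : List (Int × Int × Int)) (m : Nat), m < 2 ^ items.length →
    PySem.Int.bitCount (m : Int) = (pvSel m items).length := by
  intro items
  induction items with
  | nil =>
    intro m hm
    have : m = 0 := by simpa using hm
    subst this
    decide
  | cons x xs ih =>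
    intro m hm
    rcases Nat.eq_zero_or_pos m with rfl | hp
    · rw [pvSel_zero]
      decide
    · rw [PySem.Int.bitCount_natCast hp]
      have hm2 : m / 2 < 2 ^ xs.length := by
        simp only [List.length_cons, pow_succ] at hm
        omega
      have hrec := ih (m / 2) hm2
      by_cases h : m % 2 = 1 <;> simp [pvSel, h, ← hrec] <;> omega

lemma pvSel_surj : ∀ (items T : List (Int × Int × Int)), T.Sublist items →
    ∃ m, m < 2 ^ items.length ∧ pvSel m items = T := by
  intro items
  induction items with
  | nil =>
    intro T hT
    rcases List.sublist_nil.mp hT with rfl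
    exact ⟨0, by simp, rfl⟩
  | cons x xs ih =>
    intro T hT
    rcases List.sublist_cons_iff.mp hT with h | ⟨r, rfl, hr⟩
    · obtain ⟨m, hm, hsel⟩ := ih T h
      have h1 : (2 * m) % 2 = 0 := by omega
      have h2 : (2 * m) / 2 = m := by omega
      refine ⟨2 * m, ?_, ?_⟩
      · simp only [List.length_cons, pow_succ]; omega
      · simp [pvSel, h1, h2, hsel]
    · obtain ⟨m, hm, hsel⟩ := ih r hr
      have h1 : (2 * m + 1) % 2 = 1 := by omega
      have h2 : (2 * m + 1) / 2 = m := by omega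
      refine ⟨2 * m + 1, ?_, ?_⟩
      · simp only [List.length_cons, pow_succ]; omega
      · simp [pvSel, h1, h2, hsel]

-- the inner `for i in range(n)` loop computes the aggregates of pvSel m items
lemma pvInner (itemDamage totalSize itemCategory : List Int)
    (hs : itemDamage.length ≤ totalSize.length) (hc : itemDamage.length ≤ itemCategory.length)
    (m : Nat) (a b : Int) (st : PySem.Set Int) :
    (List.range itemDamage.length).foldl (fun (st : Int × Int × PySem.Set Int) i =>
      if m &&& (1 <<< i) ≠ 0 then
        (st.1 + (PySem.List.pyGet? itemDamage (i : Int)).getD 0,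
         st.2.1 + (PySem.List.pyGet? totalSize (i : Int)).getD 0,
         PySem.Set.add st.2.2 ((PySem.List.pyGet? itemCategory (i : Int)).getD 0))
      else st) (a, b, st)
    = (a + pvDsum (pvSel m (itemDamage.zip (totalSize.zip itemCategory))),
       b + pvSsum (pvSel m (itemDamage.zip (totalSize.zip itemCategory))),
       PySem.Set.update st (pvCats (pvSel m (itemDamage.zip (totalSize.zip itemCategory))))) := by
  induction itemDamage generalizing totalSize itemCategory m a b st with
  | nil => simp [pvSel, pvDsum, pvSsum, pvCats, PySem.Set.update]
  | cons d ds ih =>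
    cases totalSize with
    | nil => simp at hs
    | cons y sz' =>
      cases itemCategory with
      | nil => simp at hc
      | cons z cat' =>
        have hs' : ds.length ≤ sz'.length := by simpa using hs
        have hc' : ds.length ≤ cat'.length := by simpa using hc
        have hcond0 : (m &&& (1 <<< (0 : Nat)) ≠ 0) ↔ m % 2 = 1 := by
          rw [pvBit_iff, Nat.testBit_zero]; simp
        have hfun : ∀ (p : Int × Int × PySem.Set Int) (i : Nat),
            (if m &&& (1 <<< (i + 1)) ≠ 0 then
              (p.1 + (PySem.List.pyGet? (d :: ds) ((i + 1 : Nat) : Int)).getD 0,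
               p.2.1 + (PySem.List.pyGet? (y :: sz') ((i + 1 : Nat) : Int)).getD 0,
               PySem.Set.add p.2.2 ((PySem.List.pyGet? (z :: cat') ((i + 1 : Nat) : Int)).getD 0))
            else p)
            = (if (m / 2) &&& (1 <<< i) ≠ 0 then
              (p.1 + (PySem.List.pyGet? ds (i : Int)).getD 0,
               p.2.1 + (PySem.List.pyGet? sz' (i : Int)).getD 0,
               PySem.Set.add p.2.2 ((PySem.List.pyGet? cat' (i : Int)).getD 0))
            else p) := by
          intro p i
          have hcond : (m &&& (1 <<< (i + 1)) ≠ 0) ↔ ((m / 2) &&& (1 <<< i) ≠ 0) := by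
            rw [pvBit_iff, pvBit_iff, Nat.testBit_add_one]
          have hd : (PySem.List.pyGet? (d :: ds) ((i + 1 : Nat) : Int)).getD 0
              = (PySem.List.pyGet? ds (i : Int)).getD 0 := by
            simp [PySem.List.pyGet?_natCast]
          have hy : (PySem.List.pyGet? (y :: sz') ((i + 1 : Nat) : Int)).getD 0
              = (PySem.List.pyGet? sz' (i : Int)).getD 0 := by
            simp [PySem.List.pyGet?_natCast]
          have hz : (PySem.List.pyGet? (z :: cat') ((i + 1 : Nat) : Int)).getD 0
              = (PySem.List.pyGet? cat' (i : Int)).getD 0 := by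
            simp [PySem.List.pyGet?_natCast]
          by_cases hb : (m / 2) &&& (1 <<< i) ≠ 0
          · rw [if_pos (hcond.mpr hb), if_pos hb, hd, hy, hz]
          · rw [if_neg (fun hh => hb (hcond.mp hh)), if_neg hb]
        simp only [List.length_cons, List.range_succ_eq_map, List.foldl_cons, List.foldl_map,
          Nat.succ_eq_add_one]
        simp only [hfun, hcond0]
        have hzip : (d :: ds).zip ((y :: sz').zip (z :: cat')) =
            (d, y, z) :: ds.zip (sz'.zip cat') := rfl
        rw [hzip]
        by_cases hm2 : m % 2 = 1
        · rw [if_pos hm2]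
          have hget : (PySem.List.pyGet? (d :: ds) ((0 : Nat) : Int)).getD 0 = d := by
            simp [PySem.List.pyGet?_natCast]
          have hgety : (PySem.List.pyGet? (y :: sz') ((0 : Nat) : Int)).getD 0 = y := by
            simp [PySem.List.pyGet?_natCast]
          have hgetz : (PySem.List.pyGet? (z :: cat') ((0 : Nat) : Int)).getD 0 = z := by
            simp [PySem.List.pyGet?_natCast]
          rw [hget, hgety, hgetz]
          rw [ih sz' cat' hs' hc' (m / 2) (a + d) (b + y) (PySem.Set.add st z)]
          simp only [pvSel, hm2, if_pos, pvDsum, pvSsum, pvCats, List.map_cons, List.sum_cons,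
            Prod.mk.injEq]
          refine ⟨by ring, by ring, rfl⟩
        · rw [if_neg hm2]
          rw [ih sz' cat' hs' hc' (m / 2) a b st]
          simp only [pvSel, hm2, if_neg, Prod.mk.injEq]
          exact ⟨rfl, rfl, rfl⟩

lemma pvAdd_cases (s : List Int) (x : Int) :
    (x ∈ s ∧ PySem.Set.add s x = s) ∨ (x ∉ s ∧ PySem.Set.add s x = s ++ [x]) := by
  by_cases hx : x ∈ s
  · exact Or.inl ⟨hx, by simp [PySem.Set.add, PySem.Set.contains, List.contains_iff_mem, hx]⟩
  · exact Or.inr ⟨hx, by simp [PySem.Set.add, PySem.Set.contains, List.contains_iff_mem, hx]⟩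

lemma pvUpdate_length_le : ∀ (l s : List Int), (PySem.Set.update s l).length ≤ s.length + l.length := by
  intro l
  induction l with
  | nil => intro s; simp [PySem.Set.update]
  | cons x l ih =>
    intro s
    have hstep : PySem.Set.update s (x :: l) = PySem.Set.update (PySem.Set.add s x) l := rfl
    rw [hstep]
    have := ih (PySem.Set.add s x)
    rcases pvAdd_cases s x with ⟨-, he⟩ | ⟨-, he⟩ <;> rw [he] <;> rw [he] at this <;>
      simp only [List.length_append, List.length_cons, List.length_nil] at this ⊢ <;> omega

lemma pvUpdate_length_iff : ∀ (l s : List Int),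
    ((PySem.Set.update s l).length = s.length + l.length) ↔ (l.Nodup ∧ ∀ x ∈ l, x ∉ s) := by
  intro l
  induction l with
  | nil => intro s; simp [PySem.Set.update]
  | cons x l ih =>
    intro s
    have hstep : PySem.Set.update s (x :: l) = PySem.Set.update (PySem.Set.add s x) l := rfl
    rw [hstep]
    rcases pvAdd_cases s x with ⟨hx, he⟩ | ⟨hx, he⟩ <;> rw [he]
    · constructor
      · intro h
        have := pvUpdate_length_le l s
        simp only [List.length_cons] at h
        omega
      · rintro ⟨-, hall⟩
        exact absurd hx (hall x (by simp))
    · have ih' := ih (s ++ [x])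
      have harith : s.length + (x :: l).length = (s ++ [x]).length + l.length := by
        simp only [List.length_cons, List.length_append, List.length_cons, List.length_nil]
        omega
      rw [harith, ih']
      constructor
      · rintro ⟨hnd, hall⟩
        have hxl : x ∉ l := fun hxl => (hall x hxl) (by simp)
        refine ⟨List.nodup_cons.mpr ⟨hxl, hnd⟩, ?_⟩
        intro y hy
        rcases List.mem_cons.mp hy with rfl | hy'
        · exact hx
        · intro hys
          exact hall y hy' (by simp [hys])
      · rintro ⟨hnd, hall⟩
        obtain ⟨hxl, hnd'⟩ := List.nodup_cons.mp hnd
        refine ⟨hnd', ?_⟩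
        intro y hy hmem
        rcases List.mem_append.mp hmem with hys | hyx
        · exact hall y (List.mem_cons_of_mem _ hy) hys
        · rcases List.mem_singleton.mp hyx with rfl
          exact hxl hy

lemma pvEmptyUpdate_length_iff (l : List Int) :
    (PySem.Set.update PySem.Set.empty l).length = l.length ↔ l.Nodup := by
  have := pvUpdate_length_iff l []
  simpa using this

lemma pvFoldl_max_if (C : Nat → Prop) [DecidablePred C] (f : Nat → Int) :
    ∀ (l : List Nat) (a : Int),
      a ≤ l.foldl (fun a m => if C m then max a (f m) else a) a ∧
      (l.foldl (fun a m => if C m then max a (f m) else a) a = a ∨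
        ∃ m ∈ l, C m ∧ l.foldl (fun a m => if C m then max a (f m) else a) a = f m) ∧
      (∀ m ∈ l, C m → f m ≤ l.foldl (fun a m => if C m then max a (f m) else a) a) := by
  intro l
  induction l with
  | nil => intro a; simp
  | cons m l ih =>
    intro a
    simp only [List.foldl_cons]
    obtain ⟨ih1, ih2, ih3⟩ := ih (if C m then max a (f m) else a)
    refine ⟨le_trans (by split_ifs <;> simp) ih1, ?_, ?_⟩
    · rcases ih2 with heq | ⟨m', hm', hC, heq⟩
      · rw [heq]
        split_ifs with hCm
        · rcases max_choice a (f m) with h | h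
          · rw [h]; exact Or.inl rfl
          · exact Or.inr ⟨m, by simp, hCm, h⟩
        · exact Or.inl rfl
      · exact Or.inr ⟨m', List.mem_cons_of_mem _ hm', hC, heq⟩
    · intro m' hm' hC
      rcases List.mem_cons.mp hm' with rfl | hm'
      · exact le_trans (by simp [hC]) ih1
      · exact ih3 m' hm' hC

def pvBest (maxSize : Int) (items : List (Int × Int × Int)) (r : Int) : Prop :=
  0 ≤ r ∧ (r = 0 ∨ pvAch maxSize items [] 0 r) ∧ (∀ v, pvAch maxSize items [] 0 v → v ≤ r)

lemma pvBest_unique {M : Int} {items : List (Int × Int × Int)} {r r' : Int}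
    (h : pvBest M items r) (h' : pvBest M items r') : r = r' := by
  obtain ⟨h0, h1, h2⟩ := h; obtain ⟨h0', h1', h2'⟩ := h'
  have hle : r ≤ r' := by
    rcases h1 with rfl | ha
    · exact h0'
    · exact h2' _ ha
  have hge : r' ≤ r := by
    rcases h1' with rfl | ha
    · exact h0
    · exact h2 _ ha
  omega

lemma pvA_best (itemDamage totalSize itemCategory : List Int) (maxSize : Int)
    (hs : itemDamage.length ≤ totalSize.length) (hc : itemDamage.length ≤ itemCategory.length) :
    pvBest maxSize (itemDamage.zip (totalSize.zip itemCategory))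
      (solution_for_the_problem itemDamage totalSize itemCategory maxSize) := by
  have hitemslen : (itemDamage.zip (totalSize.zip itemCategory)).length = itemDamage.length := by
    simp only [List.length_zip]; omega
  simp only [solution_for_the_problem]
  simp only [pvInner itemDamage totalSize itemCategory hs hc]
  simp only [zero_add]
  obtain ⟨h1, h2, h3⟩ := pvFoldl_max_if
    (fun mask => pvSsum (pvSel mask (itemDamage.zip (totalSize.zip itemCategory))) ≤ maxSize ∧
      (PySem.Set.update PySem.Set.empty
        (pvCats (pvSel mask (itemDamage.zip (totalSize.zip itemCategory))))).length
        = PySem.Int.bitCount (mask : Int))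
    (fun mask => pvDsum (pvSel mask (itemDamage.zip (totalSize.zip itemCategory))))
    (List.range (2 ^ itemDamage.length)) 0
  refine ⟨h1, ?_, ?_⟩
  · rcases h2 with heq | ⟨mk, hmk, hC, heq⟩
    · exact Or.inl heq
    · right
      rw [heq]
      have hmklt : mk < 2 ^ (itemDamage.zip (totalSize.zip itemCategory)).length := by
        rw [hitemslen]; exact List.mem_range.mp hmk
      have hbc := pvSel_length _ mk hmklt
      have hcl : (pvCats (pvSel mk (itemDamage.zip (totalSize.zip itemCategory)))).length
          = (pvSel mk (itemDamage.zip (totalSize.zip itemCategory))).length := by simp [pvCats]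
      refine ⟨pvSel mk _, pvSel_sublist _ _, ?_, by simp, by simpa using hC.1, rfl⟩
      apply (pvEmptyUpdate_length_iff _).mp
      rw [hC.2, hbc, hcl]
  · intro v hv
    obtain ⟨T, hT, hnd, -, hsz, rfl⟩ := hv
    obtain ⟨mk, hmklt, hselT⟩ := pvSel_surj _ T hT
    have hmem : mk ∈ List.range (2 ^ itemDamage.length) :=
      List.mem_range.mpr (by rw [← hitemslen]; exact hmklt)
    have hbc := pvSel_length _ mk hmklt
    have hC : pvSsum (pvSel mk (itemDamage.zip (totalSize.zip itemCategory))) ≤ maxSize ∧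
        (PySem.Set.update PySem.Set.empty
          (pvCats (pvSel mk (itemDamage.zip (totalSize.zip itemCategory))))).length
          = PySem.Int.bitCount (mk : Int) := by
      constructor
      · rw [hselT]; simpa using hsz
      · rw [hbc, hselT]
        have hcl : (pvCats T).length = T.length := by simp [pvCats]
        rw [← hcl]
        exact (pvEmptyUpdate_length_iff _).mpr hnd
    have := h3 mk hmem hC
    rw [hselT] at this
    exact this

lemma pvB_best (itemDamage totalSize itemCategory : List Int) (maxSize : Int) :
    pvBest maxSize (itemDamage.zip (totalSize.zip itemCategory))
      (solution_for_the_problem_alt itemDamage totalSize itemCategory maxSize) := by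
  have h := pvGoB_omax maxSize (itemDamage.zip (totalSize.zip itemCategory)) PySem.Set.empty 0
  cases hg : pvGoB maxSize (itemDamage.zip (totalSize.zip itemCategory)) PySem.Set.empty 0 with
  | none =>
    rw [hg] at h
    simp only [solution_for_the_problem_alt, hg]
    exact ⟨le_refl 0, Or.inl rfl, fun v hv => absurd hv (h v)⟩
  | some r =>
    rw [hg] at h
    simp only [solution_for_the_problem_alt, hg]
    refine ⟨le_max_left 0 r, ?_, fun v hv => le_trans (h.2 v hv) (le_max_right 0 r)⟩
    rcases le_or_gt r 0 with hr | hr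
    · exact Or.inl (max_eq_left hr)
    · right
      rw [max_eq_right (le_of_lt hr)]
      exact h.1

-- ===== VERDICT (by name: the statement is the Claim_ definition above) =====
theorem solution_for_the_problem_spec : Claim_equal_solution_for_the_problem := by
  intro itemDamage totalSize itemCategory maxSize _ hpre
  exact pvBest_unique (pvA_best itemDamage totalSize itemCategory maxSize hpre.1 hpre.2)
    (pvB_best itemDamage totalSize itemCategory maxSize)
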